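-- pv_equiv track=rewrite | github.com/Elad73/PythonTutorials | python/CheckIO/elementry.py | three_words
-- ===== SOURCE A (Python) =====
-- def three_words(text):
--
--     index = 0
--     for item in text.split():
--         if item.isdigit(): index = 0
--         else:
--             index += 1
--             if index == 3:
--                 return True
--
--     return False
-- ===== SOURCE B (Python) =====
-- def three_words(text):
--     f = [not w.isdigit() for w in text.split()]
--     return any(a and b and c for a, b, c in zip(f, f[1:], f[2:]))
-- ===== Notes on version B (the rewrite author's own statement) =====
-- stated objective: idiomatic
-- what changed: Replaces the running counter with resets by a flags list and an any() over a sliding window of three shifted views (zip(f, f[1:], f[2:])).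
import Mathlib
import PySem

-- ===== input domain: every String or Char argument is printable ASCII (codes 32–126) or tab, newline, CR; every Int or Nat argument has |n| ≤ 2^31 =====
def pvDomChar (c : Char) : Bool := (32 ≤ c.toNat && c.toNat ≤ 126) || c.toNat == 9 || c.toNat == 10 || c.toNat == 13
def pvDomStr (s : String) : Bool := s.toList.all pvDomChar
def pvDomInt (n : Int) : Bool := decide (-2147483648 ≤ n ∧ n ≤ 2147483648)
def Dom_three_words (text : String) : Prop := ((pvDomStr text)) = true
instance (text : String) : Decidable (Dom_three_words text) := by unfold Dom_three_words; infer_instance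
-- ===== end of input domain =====

-- B replaces A's running counter (reset on digits) by a flags list and a sliding-window any over three shifted views; same cost, more idiomatic.

-- ===== PORT A =====
-- A's for-loop with early return, as structural recursion over the word list carrying the counter `index`.
def threeWordsLoop : List String → Nat → Bool
  | [], _ => false
  | w :: ws, index =>
    if PySem.Str.strIsdigit w then threeWordsLoop ws 0
    else if index + 1 = 3 then true
    else threeWordsLoop ws (index + 1)

def three_words (text : String) : Bool :=
  threeWordsLoop (PySem.Str.split₀ text) 0

-- ===== PORT B =====
def three_words_alt (text : String) : Bool :=
  let f := (PySem.Str.split₀ text).map (fun w => !PySem.Str.strIsdigit w)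
  ((f.zip ((PySem.List.slice f (some 1) none).zip (PySem.List.slice f (some 2) none))).any
    (fun t => t.1 && t.2.1 && t.2.2))

-- ===== PRECONDITION & SPEC =====
def Spec_three_words (text : String) (out : Bool) : Prop := out = three_words_alt text
instance (text : String) (out : Bool) : Decidable (Spec_three_words text out) := by unfold Spec_three_words; infer_instance

-- ===== CLAIM (what is proved, stated in full; the proofs are below) =====
def Claim_equal_three_words : Prop := ∀ (text : String), Dom_three_words text → Spec_three_words text (three_words text)

-- ===== LEMMAS AND PROOFS =====

-- A's loop on the boolean flags (true = non-digit word).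
def loopF : List Bool → Nat → Bool
  | [], _ => false
  | b :: bs, index =>
    if b then (if index + 1 = 3 then true else loopF bs (index + 1))
    else loopF bs 0

lemma threeWordsLoop_eq_loopF (ws : List String) (i : Nat) :
    threeWordsLoop ws i = loopF (ws.map (fun w => !PySem.Str.strIsdigit w)) i := by
  induction ws generalizing i with
  | nil => rfl
  | cons w ws ih =>
    simp only [threeWordsLoop, List.map, loopF]
    cases h : PySem.Chars.strIsdigit w.toList <;> simp [h, ih]

-- recursive window check
def winR : List Bool → Bool
  | a :: b :: c :: rest => a && b && c || winR (b :: c :: rest)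
  | _ => false

lemma win_eq_winR (f : List Bool) :
    ((f.zip ((f.drop 1).zip (f.drop 2))).any (fun t => t.1 && t.2.1 && t.2.2)) = winR f := by
  match f with
  | [] => rfl
  | [_] => rfl
  | [_, _] => rfl
  | a :: b :: c :: rest =>
    simp only [List.drop, List.zip_cons_cons, List.any_cons, winR]
    have := win_eq_winR (b :: c :: rest)
    simp only [List.drop] at this
    rw [this]

lemma winR_false_cons (bs : List Bool) : winR (false :: bs) = winR bs := by
  match bs with
  | [] => rfl
  | [_] => rfl
  | _ :: _ :: _ => simp [winR]

lemma winR_tf (bs : List Bool) : winR (true :: false :: bs) = winR bs := by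
  match bs with
  | [] => rfl
  | x :: rest => simp [winR, winR_false_cons]

lemma loopF_eq_winR (bs : List Bool) (i : Nat) (hi : i ≤ 2) :
    loopF bs i = winR (List.replicate i true ++ bs) := by
  induction bs generalizing i with
  | nil =>
    interval_cases i <;> rfl
  | cons b bs ih =>
    cases b with
    | false =>
      have h0 : loopF (false :: bs) i = loopF bs 0 := by simp [loopF]
      rw [h0, ih 0 (by omega)]
      interval_cases i <;> simp [winR, winR_false_cons, winR_tf]
    | true =>
      by_cases h3 : i + 1 = 3
      · have : i = 2 := by omega
        subst this
        simp [loopF, List.replicate, winR]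
      · have h1 : loopF (true :: bs) i = loopF bs (i + 1) := by simp [loopF, h3]
        rw [h1, ih (i + 1) (by omega)]
        have : List.replicate i true ++ true :: bs = List.replicate (i + 1) true ++ bs := by
          rw [List.replicate_succ']
          simp
        rw [this]

-- ===== VERDICT (by name: the statement is the Claim_ definition above) =====
theorem three_words_spec : Claim_equal_three_words := by
  intro text _
  unfold Spec_three_words three_words three_words_alt
  rw [threeWordsLoop_eq_loopF, loopF_eq_winR _ 0 (by omega)]
  simp only [List.replicate, List.nil_append]
  rw [show PySem.List.slice ((PySem.Str.split₀ text).map (fun w => !PySem.Str.strIsdigit w)) (some 1) none = ((PySem.Str.split₀ text).map (fun w => !PySem.Str.strIsdigit w)).drop 1 from PySem.List.slice_from_natCast _ 1,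
      show PySem.List.slice ((PySem.Str.split₀ text).map (fun w => !PySem.Str.strIsdigit w)) (some 2) none = ((PySem.Str.split₀ text).map (fun w => !PySem.Str.strIsdigit w)).drop 2 from PySem.List.slice_from_natCast _ 2]
  exact (win_eq_winR _).symm
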